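-- pv_equiv track=rewrite | github.com/miliar/Code_Jam_Webscraper | solutions_python/Problem_59/299.py | count_mkdirs
-- ===== SOURCE A (Python) =====
-- def count_mkdirs(dir, existing, mkdir):
--     if dir == '': return mkdir
--     try:
--         existing.index(dir)
--         return mkdir
--     except:
--         # directory does not exist
--         existing.append(dir)
--         return count_mkdirs(dir.rpartition('/')[0], existing, mkdir+1)
-- ===== SOURCE B (Python) =====
-- def count_mkdirs(dir, existing, mkdir):
--     # Return-value equivalent to A; does NOT mutate `existing` (A appends to it).
--     if dir == '':
--         return mkdir
--     # One left-to-right pass: collect every nonempty prefix that ends just before a '/'.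
--     prefixes = []
--     pre = ''
--     for ch in dir:
--         if ch == '/' and pre != '':
--             prefixes.append(pre)
--         pre += ch
--     prefixes.append(pre)  # dir itself, the longest
--     # Count prefixes, longest first, until one already exists.
--     missing = 0
--     for p in reversed(prefixes):
--         if p in existing:
--             break
--         missing += 1
--     return mkdir + missing
-- ===== Notes on version B (the rewrite author's own statement) =====
-- stated objective: alternative
-- what changed: Replaces the mutating try/except recursion on rpartition (which appends each missing dir to `existing` and recurses on the parent with mkdir+1) by a single left-to-right character scan that builds every ancestor prefix in one pass, then counts prefixes longest-first until one is found in `existing`; the appends are dropped because each appended string is strictly longer than every later lookup, so they can never be found.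
import Mathlib
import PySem

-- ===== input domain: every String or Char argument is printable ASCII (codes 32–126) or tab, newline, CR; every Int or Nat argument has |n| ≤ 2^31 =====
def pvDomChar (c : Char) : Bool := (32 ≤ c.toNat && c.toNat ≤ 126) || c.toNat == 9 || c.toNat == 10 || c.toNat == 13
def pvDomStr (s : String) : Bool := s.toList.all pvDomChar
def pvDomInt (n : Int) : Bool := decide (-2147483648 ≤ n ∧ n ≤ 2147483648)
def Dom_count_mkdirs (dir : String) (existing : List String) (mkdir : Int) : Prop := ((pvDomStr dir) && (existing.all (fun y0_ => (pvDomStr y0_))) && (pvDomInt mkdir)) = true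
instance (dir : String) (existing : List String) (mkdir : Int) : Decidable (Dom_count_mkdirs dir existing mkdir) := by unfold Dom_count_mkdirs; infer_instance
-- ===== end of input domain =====

-- B replaces A's mutating try/except recursion on rpartition by a single left-to-right
-- character scan that collects all ancestor prefixes, then counts them longest-first until
-- one is found in `existing`; equivalence is about the RETURN value only: A appends the
-- missing directories to `existing`, B does not mutate it.

-- ===== PORT A =====
-- dir.rpartition('/')[0]: everything before the LAST '/', or '' if there is no '/'.
-- Hand-ported (no PySem rpartition): exact via reversed char list.
def pvRpart (s : String) : String :=
  String.ofList (((s.toList.reverse.dropWhile (fun c => c ≠ '/')).drop 1).reverse)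

theorem pv_toList_ne_nil (s : String) (h : s ≠ "") : s.toList ≠ [] := by
  intro hnil
  apply h
  have hs := String.ofList_toList (s := s)
  rw [hnil] at hs
  exact hs.symm

theorem pvRpart_length_lt (s : String) (h : s ≠ "") : (pvRpart s).length < s.length := by
  have hpos : 0 < s.toList.length := List.length_pos_of_ne_nil (pv_toList_ne_nil s h)
  have h1 : (s.toList.reverse.dropWhile (fun c => c ≠ '/')).length ≤ s.toList.length := by
    simpa using List.length_dropWhile_le (p := fun c => c ≠ '/') (l := s.toList.reverse)
  rw [pvRpart, String.length_ofList, List.length_reverse, List.length_drop,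
    ← String.length_toList]
  omega

def count_mkdirs (dir : String) (existing : List String) (mkdir : Int) : Int :=
  if _h : dir = "" then mkdir
  else if (PySem.List.index? existing dir).isSome then mkdir  -- existing.index(dir) succeeds
  else
    -- except branch: existing.append(dir); recurse on the parent
    count_mkdirs (pvRpart dir) (existing ++ [dir]) (mkdir + 1)
termination_by dir.length
decreasing_by exact pvRpart_length_lt dir _h

-- ===== PORT B =====
-- The for-loop over dir's characters: state is (prefixes, pre); each '/' met with a
-- nonempty pre records pre as an ancestor prefix.
def pvStep (st : List String × List Char) (c : Char) : List String × List Char :=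
  ((if c = '/' ∧ st.2 ≠ [] then st.1 ++ [String.ofList st.2] else st.1), st.2 ++ [c])

-- The counting loop: prefixes longest first, stop (break) at the first one in `existing`.
def pvCountLoop (existing : List String) : List String → Int
  | [] => 0
  | p :: rest => if p ∈ existing then 0 else 1 + pvCountLoop existing rest

def count_mkdirs_alt (dir : String) (existing : List String) (mkdir : Int) : Int :=
  if dir = "" then mkdir
  else
    let st := dir.toList.foldl pvStep ([], [])
    let prefixes := st.1 ++ [String.ofList st.2]   -- dir itself, the longest
    mkdir + pvCountLoop existing prefixes.reverse

-- ===== PRECONDITION & SPEC =====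
def Spec_count_mkdirs (dir : String) (existing : List String) (mkdir : Int) (out : Int) : Prop := out = count_mkdirs_alt dir existing mkdir
instance (dir : String) (existing : List String) (mkdir : Int) (out : Int) : Decidable (Spec_count_mkdirs dir existing mkdir out) := by unfold Spec_count_mkdirs; infer_instance

-- ===== CLAIM (what is proved, stated in full; the proofs are below) =====
def Claim_equal_count_mkdirs : Prop := ∀ (dir : String) (existing : List String) (mkdir : Int), Dom_count_mkdirs dir existing mkdir → Spec_count_mkdirs dir existing mkdir (count_mkdirs dir existing mkdir)

-- ===== LEMMAS AND PROOFS =====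

-- Proof-side characterisation of A: the chain of ancestor prefixes, leaf first.
def pvChain (dir : String) : List String :=
  if _h : dir = "" then [] else dir :: pvChain (pvRpart dir)
termination_by dir.length
decreasing_by exact pvRpart_length_lt dir _h

theorem pv_len_zero_eq_empty (s : String) (h : s.length ≤ 0) : s = "" := by
  have hn : s.toList.length = 0 := by rw [String.length_toList]; omega
  have hnil := List.length_eq_zero_iff.mp hn
  have hs := String.ofList_toList (s := s)
  rw [hnil] at hs
  exact hs.symm

-- Invariant: the strings A has appended so far (`extra`) are all strictly longer than the
-- current dir (hence than every later lookup), so they never affect membership tests; under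
-- that hypothesis A equals mkdir plus the pure count over the ancestor chain.
theorem pv_key (n : Nat) : ∀ (dir : String), dir.length ≤ n →
    ∀ (existing extra : List String) (mkdir : Int),
    (∀ s ∈ extra, dir.length < s.length) →
    count_mkdirs dir (existing ++ extra) mkdir = mkdir + pvCountLoop existing (pvChain dir) := by
  induction n with
  | zero =>
    intro dir hlen existing extra mkdir _
    have : dir = "" := pv_len_zero_eq_empty dir hlen
    subst this
    simp [count_mkdirs, pvChain, pvCountLoop]
  | succ n ih =>
    intro dir hlen existing extra mkdir hextra
    by_cases hd : dir = ""
    · subst hd; simp [count_mkdirs, pvChain, pvCountLoop]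
    · have hmem : ((PySem.List.index? (existing ++ extra) dir).isSome = true) ↔ dir ∈ existing := by
        rw [PySem.List.index?_isSome_iff, List.mem_append]
        constructor
        · rintro (h | h)
          · exact h
          · exact absurd (hextra dir h) (lt_irrefl _)
        · exact Or.inl
      rw [count_mkdirs, pvChain]
      simp only [hd, dif_neg, not_false_iff]
      by_cases hin : dir ∈ existing
      · rw [if_pos (hmem.mpr hin)]
        simp [pvCountLoop, hin]
      · rw [if_neg (fun hs => hin (hmem.mp hs))]
        have hlt : (pvRpart dir).length < dir.length := pvRpart_length_lt dir hd
        have step : count_mkdirs (pvRpart dir) ((existing ++ extra) ++ [dir]) (mkdir + 1)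
            = (mkdir + 1) + pvCountLoop existing (pvChain (pvRpart dir)) := by
          rw [List.append_assoc]
          apply ih (pvRpart dir) (by omega) existing (extra ++ [dir]) (mkdir + 1)
          intro s hs
          rcases List.mem_append.mp hs with h | h
          · exact Nat.lt_trans hlt (hextra s h)
          · simp at h; subst h; exact hlt
        rw [step]
        simp [pvCountLoop, hin]
        ring

-- The prefixes recorded by B's scan over `rest` starting from accumulator `pre`.
def pvInner : List Char → List Char → List String
  | _, [] => []
  | pre, c :: rest =>
      (if c = '/' ∧ pre ≠ [] then [String.ofList pre] else []) ++ pvInner (pre ++ [c]) rest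

theorem pv_fold_inner (l : List Char) : ∀ (acc : List String) (pre : List Char),
    l.foldl pvStep (acc, pre) = (acc ++ pvInner pre l, pre ++ l) := by
  induction l with
  | nil => intro acc pre; simp [pvInner]
  | cons c rest ih =>
    intro acc pre
    simp only [List.foldl_cons, pvStep, pvInner]
    rw [ih]
    by_cases h : c = '/' ∧ pre ≠ [] <;> simp [h]

theorem pv_inner_snoc (cs : List Char) : ∀ (pre : List Char) (c : Char),
    pvInner pre (cs ++ [c]) =
      pvInner pre cs ++ (if c = '/' ∧ pre ++ cs ≠ [] then [String.ofList (pre ++ cs)] else []) := by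
  induction cs with
  | nil => intro pre c; simp [pvInner]
  | cons d cs' ih =>
    intro pre c
    simp only [List.cons_append, pvInner, ih (pre ++ [d]) c, List.append_assoc]
    simp

theorem pv_rpart_snoc_slash (cs : List Char) :
    pvRpart (String.ofList (cs ++ ['/'])) = String.ofList cs := by
  simp [pvRpart, List.dropWhile]

theorem pv_rpart_snoc_other (cs : List Char) (c : Char) (h : c ≠ '/') :
    pvRpart (String.ofList (cs ++ [c])) = pvRpart (String.ofList cs) := by
  simp [pvRpart, h]

theorem pv_ofList_ne_empty (cs : List Char) (h : cs ≠ []) : String.ofList cs ≠ "" := by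
  intro he
  apply h
  have : (String.ofList cs).toList = ("" : String).toList := by rw [he]
  simpa using this

-- B's scan lists exactly the tail of A's chain (reversed): the ancestors of cs itself.
theorem pv_inner_chain (cs : List Char) :
    (pvInner [] cs).reverse = pvChain (pvRpart (String.ofList cs)) := by
  induction cs using List.reverseRecOn with
  | nil => simp [pvInner, pvRpart, pvChain]
  | append_singleton cs' c ih =>
    by_cases hc : c = '/'
    · subst hc
      rw [pv_inner_snoc, pv_rpart_snoc_slash]
      by_cases h0 : cs' = []
      · subst h0; simp [pvInner, pvChain]
      · rw [pvChain]
        simp only [pv_ofList_ne_empty cs' h0, dif_neg, not_false_iff]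
        simp [h0, ih]
    · rw [pv_inner_snoc, pv_rpart_snoc_other cs' c hc]
      simp [hc, ih]

-- ===== VERDICT (by name: the statement is the Claim_ definition above) =====
theorem count_mkdirs_spec : Claim_equal_count_mkdirs := by
  intro dir existing mkdir _
  unfold Spec_count_mkdirs count_mkdirs_alt
  by_cases hd : dir = ""
  · subst hd; simp [count_mkdirs]
  · rw [if_neg hd]
    have hA := pv_key dir.length dir le_rfl existing [] mkdir (by simp)
    simp only [List.append_nil] at hA
    rw [hA]
    have hfold := pv_fold_inner dir.toList [] []
    simp only [List.nil_append] at hfold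
    rw [hfold]
    have hrev : ((pvInner [] dir.toList ++ [String.ofList dir.toList]).reverse)
        = dir :: pvChain (pvRpart dir) := by
      rw [List.reverse_append, pv_inner_chain]
      simp [String.ofList_toList]
    show mkdir + pvCountLoop existing (pvChain dir)
        = mkdir + pvCountLoop existing ((pvInner [] dir.toList ++ [String.ofList dir.toList]).reverse)
    rw [hrev, pvChain]
    simp [hd]
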